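-- pv_equiv track=rewrite | github.com/codehound42/Cube-Puzzle-Solver | puzzle_solver.py | get_new_points
-- ===== SOURCE A (Python) =====
-- def get_new_points(points, piece_counter, new_axis):
-- 	last_point = points[-1]
--
-- 	new_points = []
-- 	next_point = last_point
-- 	for _ in range(puzzle_pieces[piece_counter]):
-- 		next_point = get_next_point(next_point, new_axis)
-- 		new_points.append(next_point)
--
-- 	return new_points
--
-- def get_next_point(point, axis):
-- 	(x, y, z) = point
-- 	sign = 1 if axis > 0 else -1
-- 	if abs(axis) == 1:
-- 		return (x+sign, y, z)
-- 	elif abs(axis) == 2: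
-- 		return (x, y+sign, z)
-- 	else:
-- 		return (x, y, z+sign)
--
-- puzzle_pieces = [2, 2, 2, 1, 1, 1, 2, 2, 1, 1, 2, 1, 2, 1, 1, 2]
-- ===== SOURCE B (Python) =====
-- puzzle_pieces = [2, 2, 2, 1, 1, 1, 2, 2, 1, 1, 2, 1, 2, 1, 1, 2]
--
-- def get_new_points(points, piece_counter, new_axis):
--     (x, y, z) = points[-1]
--     sign = 1 if new_axis > 0 else -1
--     a = abs(new_axis)
--     n = puzzle_pieces[piece_counter]
--     if a == 1:
--         return [(x + i * sign, y, z) for i in range(1, n + 1)]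
--     elif a == 2:
--         return [(x, y + i * sign, z) for i in range(1, n + 1)]
--     else:
--         return [(x, y, z + i * sign) for i in range(1, n + 1)]
-- ===== Notes on version B (the rewrite author's own statement) =====
-- stated objective: simpler
-- what changed: Replaces the stepping accumulator loop and the get_next_point helper by a closed-form comprehension: the axis and sign are decoded once and the i-th point is computed directly as the last point shifted by i*sign on that axis.
import Mathlib
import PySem

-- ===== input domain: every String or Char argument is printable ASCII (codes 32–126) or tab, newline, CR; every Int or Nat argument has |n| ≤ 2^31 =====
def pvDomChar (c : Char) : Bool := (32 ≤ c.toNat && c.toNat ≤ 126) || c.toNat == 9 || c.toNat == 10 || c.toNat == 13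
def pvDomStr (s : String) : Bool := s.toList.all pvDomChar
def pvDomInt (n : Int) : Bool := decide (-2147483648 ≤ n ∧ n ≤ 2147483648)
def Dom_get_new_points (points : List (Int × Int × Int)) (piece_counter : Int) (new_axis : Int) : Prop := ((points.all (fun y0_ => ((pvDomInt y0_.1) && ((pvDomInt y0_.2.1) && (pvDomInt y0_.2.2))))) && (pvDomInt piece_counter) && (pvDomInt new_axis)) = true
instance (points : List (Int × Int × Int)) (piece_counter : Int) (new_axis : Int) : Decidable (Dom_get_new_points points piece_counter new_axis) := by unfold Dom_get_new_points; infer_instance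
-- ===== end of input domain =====

-- ===== PORT A =====
-- B changes: closed-form comprehension per axis instead of a stepping accumulator loop (objective: simpler).
def puzzle_pieces : List Int := [2, 2, 2, 1, 1, 1, 2, 2, 1, 1, 2, 1, 2, 1, 1, 2]

def get_next_point (point : Int × Int × Int) (axis : Int) : Int × Int × Int :=
  let (x, y, z) := point
  let sign : Int := if axis > 0 then 1 else -1
  if |axis| = 1 then (x + sign, y, z)
  else if |axis| = 2 then (x, y + sign, z)
  else (x, y, z + sign)

def get_new_points (points : List (Int × Int × Int)) (piece_counter : Int) (new_axis : Int) : List (Int × Int × Int) :=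
  let last_point := (PySem.List.pyGet? points (-1)).getD (0, 0, 0)
  let n := (PySem.List.pyGet? puzzle_pieces piece_counter).getD 0
  let st := (PySem.List.pyRange 0 n 1).foldl
    (fun (st : List (Int × Int × Int) × (Int × Int × Int)) _ =>
      let next_point := get_next_point st.2 new_axis
      (st.1 ++ [next_point], next_point)) ([], last_point)
  st.1

-- ===== PORT B =====
def puzzle_pieces_alt : List Int := [2, 2, 2, 1, 1, 1, 2, 2, 1, 1, 2, 1, 2, 1, 1, 2]

def get_new_points_alt (points : List (Int × Int × Int)) (piece_counter : Int) (new_axis : Int) : List (Int × Int × Int) :=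
  let (x, y, z) := (PySem.List.pyGet? points (-1)).getD (0, 0, 0)
  let sign : Int := if new_axis > 0 then 1 else -1
  let a := |new_axis|
  let n := (PySem.List.pyGet? puzzle_pieces_alt piece_counter).getD 0
  if a = 1 then (PySem.List.pyRange 1 (n + 1) 1).map (fun i => (x + i * sign, y, z))
  else if a = 2 then (PySem.List.pyRange 1 (n + 1) 1).map (fun i => (x, y + i * sign, z))
  else (PySem.List.pyRange 1 (n + 1) 1).map (fun i => (x, y, z + i * sign))

-- ===== PRECONDITION & SPEC =====
-- A raises IndexError on empty points (points[-1]) and on piece_counter outside the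
-- 16-element puzzle_pieces table; exactly those inputs are excluded.
def Pre_get_new_points (points : List (Int × Int × Int)) (piece_counter : Int) (new_axis : Int) : Prop :=
  points ≠ [] ∧ -16 ≤ piece_counter ∧ piece_counter < 16
instance (points : List (Int × Int × Int)) (piece_counter : Int) (new_axis : Int) : Decidable (Pre_get_new_points points piece_counter new_axis) := by unfold Pre_get_new_points; infer_instance
def pvWitness_get_new_points : (List (Int × Int × Int)) × Int × Int := ([(1, 2, 3)], 0, -2)

def Spec_get_new_points (points : List (Int × Int × Int)) (piece_counter : Int) (new_axis : Int) (out : List (Int × Int × Int)) : Prop := out = get_new_points_alt points piece_counter new_axis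
instance (points : List (Int × Int × Int)) (piece_counter : Int) (new_axis : Int) (out : List (Int × Int × Int)) : Decidable (Spec_get_new_points points piece_counter new_axis out) := by unfold Spec_get_new_points; infer_instance

-- ===== CLAIM (what is proved, stated in full; the proofs are below) =====
def Claim_equal_get_new_points : Prop := ∀ (points : List (Int × Int × Int)) (piece_counter : Int) (new_axis : Int), Dom_get_new_points points piece_counter new_axis → Pre_get_new_points points piece_counter new_axis → Spec_get_new_points points piece_counter new_axis (get_new_points points piece_counter new_axis)

-- ===== LEMMAS AND PROOFS =====
lemma pp_val (pc : Int) (h1 : -16 ≤ pc) (h2 : pc < 16) :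
    (PySem.List.pyGet? puzzle_pieces pc).getD 0 = 1 ∨ (PySem.List.pyGet? puzzle_pieces pc).getD 0 = 2 := by
  interval_cases pc <;> decide

lemma core_eq (lp : Int × Int × Int) (na n : Int) (hn : n = 1 ∨ n = 2) :
    ((PySem.List.pyRange 0 n 1).foldl
      (fun (st : List (Int × Int × Int) × (Int × Int × Int)) _ =>
        let next_point := get_next_point st.2 na
        (st.1 ++ [next_point], next_point)) ([], lp)).1
    =
    (let (x, y, z) := lp
     let sign : Int := if na > 0 then 1 else -1
     let a := |na|
     if a = 1 then (PySem.List.pyRange 1 (n + 1) 1).map (fun i => (x + i * sign, y, z))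
     else if a = 2 then (PySem.List.pyRange 1 (n + 1) 1).map (fun i => (x, y + i * sign, z))
     else (PySem.List.pyRange 1 (n + 1) 1).map (fun i => (x, y, z + i * sign))) := by
  obtain ⟨x, y, z⟩ := lp
  rcases hn with rfl | rfl <;>
    simp only [show PySem.List.pyRange 0 1 1 = [0] from by decide,
               show PySem.List.pyRange 0 2 1 = [0, 1] from by decide,
               show PySem.List.pyRange 1 (1 + 1) 1 = [1] from by decide,
               show PySem.List.pyRange 1 (2 + 1) 1 = [1, 2] from by decide,
               List.foldl, List.map, get_next_point] <;>
    split_ifs <;> simp <;> ring_nf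

-- ===== VERDICT (by name: the statement is the Claim_ definition above) =====
theorem get_new_points_spec : Claim_equal_get_new_points := by
  intro points pc na _ hpre
  obtain ⟨hne, h1, h2⟩ := hpre
  unfold Spec_get_new_points get_new_points get_new_points_alt
  have hpp : puzzle_pieces_alt = puzzle_pieces := rfl
  rw [hpp]
  exact core_eq _ na _ (pp_val pc h1 h2)
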